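-- pv_equiv track=rewrite | github.com/Ragunath041/Python | OOPS/16_ATM machine.py | ATMmachine
-- ===== SOURCE A (Python) =====
-- def ATMmachine(n , amt , hun , t_hun , f_hun , tho):
--
--     max_notes = 0
--     for i in range(hun + 1):
--         for j in range(t_hun + 1):
--             for k in range(f_hun + 1):
--                 for l in range(tho + 1):
--                     total_amount = i * 100 + j * 200 + k * 500 + l * 1000
--                     total_notes = i + j + k + l
--                     if total_amount == amt and total_notes <= n and total_notes > max_notes:
--                         max_notes = total_notes
--     return max_notes
-- ===== SOURCE B (Python) =====
-- def ATMmachine(n, amt, hun, t_hun, f_hun, tho):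
--     # No 100-note count i (0<=i<=hun) or 200-note count j exists when the bound is
--     # negative, and every attainable total is a multiple of 100.
--     if hun < 0 or t_hun < 0 or amt % 100 != 0:
--         return 0
--     best = 0
--     # Only counts of 500s (k) and 1000s (l) that can fit the amount and the note
--     # budget n are scanned; the optimal 100/200 split of the remainder is closed-form:
--     # with i + 2*j = m fixed, notes = k+l+m-j, so take the smallest feasible j.
--     for k in range(min(f_hun, amt // 500, n) + 1):
--         rem = amt - 500 * k
--         for l in range(min(tho, rem // 1000, n - k) + 1):
--             m = (rem - 1000 * l) // 100  # i + 2*j must equal m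
--             j = max(0, (m - hun + 1) // 2, k + l + m - n)
--             if j <= t_hun and m - 2 * j >= 0:
--                 best = max(best, k + l + m - j)
--     return best
-- ===== Notes on version B (the rewrite author's own statement) =====
-- stated objective: faster
-- what changed: B drops A's four nested loops over all (i,j,k,l) note quadruples and scans only the 500- and 1000-note counts (k,l), computing the optimal 100/200-note split of the remainder in closed form (smallest feasible number of 200s).
import Mathlib
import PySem

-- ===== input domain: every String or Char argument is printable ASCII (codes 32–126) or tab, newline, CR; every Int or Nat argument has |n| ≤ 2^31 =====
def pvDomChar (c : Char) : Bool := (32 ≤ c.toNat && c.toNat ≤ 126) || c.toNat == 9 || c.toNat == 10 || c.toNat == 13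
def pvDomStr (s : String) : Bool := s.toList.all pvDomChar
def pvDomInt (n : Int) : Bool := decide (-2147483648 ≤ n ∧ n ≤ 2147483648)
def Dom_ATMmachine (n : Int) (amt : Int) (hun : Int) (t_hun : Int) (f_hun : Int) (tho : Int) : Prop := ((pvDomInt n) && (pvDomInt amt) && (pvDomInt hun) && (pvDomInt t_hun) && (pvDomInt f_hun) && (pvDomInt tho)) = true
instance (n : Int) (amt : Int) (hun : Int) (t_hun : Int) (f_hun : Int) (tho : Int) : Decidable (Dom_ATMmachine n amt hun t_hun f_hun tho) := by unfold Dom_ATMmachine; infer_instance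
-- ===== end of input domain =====

-- B replaces A's brute force over all (i,j,k,l) quadruples by a scan over (k,l) only,
-- solving the remaining 100/200-note split in closed form: asymptotically faster.

-- ===== PORT A =====
def ATMmachine (n : Int) (amt : Int) (hun : Int) (t_hun : Int) (f_hun : Int) (tho : Int) : Int :=
  (PySem.List.pyRange 0 (hun + 1) 1).foldl (fun acc i =>
    (PySem.List.pyRange 0 (t_hun + 1) 1).foldl (fun acc j =>
      (PySem.List.pyRange 0 (f_hun + 1) 1).foldl (fun acc k =>
        (PySem.List.pyRange 0 (tho + 1) 1).foldl (fun acc l =>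
          let total_amount := i * 100 + j * 200 + k * 500 + l * 1000
          let total_notes := i + j + k + l
          if total_amount = amt ∧ total_notes ≤ n ∧ total_notes > acc then total_notes
          else acc) acc) acc) acc) 0

-- ===== PORT B =====
def ATMmachine_alt (n : Int) (amt : Int) (hun : Int) (t_hun : Int) (f_hun : Int) (tho : Int) : Int :=
  if hun < 0 ∨ t_hun < 0 ∨ PySem.Int.mod amt 100 ≠ 0 then 0
  else
    (PySem.List.pyRange 0 (min (min f_hun (PySem.Int.floordiv amt 500)) n + 1) 1).foldl (fun best k =>
      let rem := amt - 500 * k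
      (PySem.List.pyRange 0 (min (min tho (PySem.Int.floordiv rem 1000)) (n - k) + 1) 1).foldl (fun best l =>
        let m := PySem.Int.floordiv (rem - 1000 * l) 100
        let j := max (max 0 (PySem.Int.floordiv (m - hun + 1) 2)) (k + l + m - n)
        if j ≤ t_hun ∧ m - 2 * j ≥ 0 then max best (k + l + m - j)
        else best) best) 0

-- ===== PRECONDITION & SPEC =====
def Spec_ATMmachine (n : Int) (amt : Int) (hun : Int) (t_hun : Int) (f_hun : Int) (tho : Int) (out : Int) : Prop := out = ATMmachine_alt n amt hun t_hun f_hun tho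
instance (n : Int) (amt : Int) (hun : Int) (t_hun : Int) (f_hun : Int) (tho : Int) (out : Int) : Decidable (Spec_ATMmachine n amt hun t_hun f_hun tho out) := by unfold Spec_ATMmachine; infer_instance

-- ===== CLAIM (what is proved, stated in full; the proofs are below) =====
def Claim_equal_ATMmachine : Prop := ∀ (n : Int) (amt : Int) (hun : Int) (t_hun : Int) (f_hun : Int) (tho : Int), Dom_ATMmachine n amt hun t_hun f_hun tho → Spec_ATMmachine n amt hun t_hun f_hun tho (ATMmachine n amt hun t_hun f_hun tho)

-- ===== LEMMAS AND PROOFS =====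

-- "v is the note count of a valid dispensation": the common value both programs maximize.
def ValidNotes (n amt hun t_hun f_hun tho v : Int) : Prop :=
  ∃ i j k l : Int, 0 ≤ i ∧ i ≤ hun ∧ 0 ≤ j ∧ j ≤ t_hun ∧ 0 ≤ k ∧ k ≤ f_hun ∧
    0 ≤ l ∧ l ≤ tho ∧ i * 100 + j * 200 + k * 500 + l * 1000 = amt ∧
    i + j + k + l ≤ n ∧ v = i + j + k + l

-- Generic characterization of a fold whose step only ever raises the accumulator
-- to a value satisfying Q, and dominates every Q-value.
theorem foldl_char {α : Type} (g : Int → α → Int) (Q : α → Int → Prop)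
    (h1 : ∀ x a, a ≤ g a x)
    (h2 : ∀ x a, g a x = a ∨ Q x (g a x))
    (h3 : ∀ x a v, Q x v → v ≤ g a x) :
    ∀ (L : List α) (a : Int),
      a ≤ L.foldl g a ∧
      (L.foldl g a = a ∨ ∃ x ∈ L, Q x (L.foldl g a)) ∧
      (∀ x ∈ L, ∀ v, Q x v → v ≤ L.foldl g a) := by
  intro L
  induction L with
  | nil => intro a; simp
  | cons hd tl ih =>
    intro a
    obtain ⟨ih1, ih2, ih3⟩ := ih (g a hd)
    simp only [List.foldl_cons]
    refine ⟨le_trans (h1 hd a) ih1, ?_, ?_⟩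
    · rcases ih2 with h | h
      · rw [h]
        rcases h2 hd a with h' | h'
        · exact Or.inl h'
        · exact Or.inr ⟨hd, List.mem_cons_self, h'⟩
      · obtain ⟨x, hx, hq⟩ := h
        exact Or.inr ⟨x, List.mem_cons_of_mem _ hx, hq⟩
    · intro x hx v hq
      rcases List.mem_cons.mp hx with rfl | hx
      · exact le_trans (h3 x a v hq) ih1
      · exact ih3 x hx v hq


theorem charA (n amt hun t_hun f_hun tho : Int) :
    0 ≤ ATMmachine n amt hun t_hun f_hun tho ∧
    (ATMmachine n amt hun t_hun f_hun tho = 0 ∨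
      ValidNotes n amt hun t_hun f_hun tho (ATMmachine n amt hun t_hun f_hun tho)) ∧
    (∀ v, ValidNotes n amt hun t_hun f_hun tho v → v ≤ ATMmachine n amt hun t_hun f_hun tho) := by
  have C4 : ∀ (i j k : Int), ∀ (L : List Int) (a : Int),
      a ≤ L.foldl (fun acc l =>
          let total_amount := i * 100 + j * 200 + k * 500 + l * 1000
          let total_notes := i + j + k + l
          if total_amount = amt ∧ total_notes ≤ n ∧ total_notes > acc then total_notes
          else acc) a ∧
      (L.foldl (fun acc l =>
          let total_amount := i * 100 + j * 200 + k * 500 + l * 1000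
          let total_notes := i + j + k + l
          if total_amount = amt ∧ total_notes ≤ n ∧ total_notes > acc then total_notes
          else acc) a = a ∨
        ∃ l ∈ L, (i * 100 + j * 200 + k * 500 + l * 1000 = amt ∧ i + j + k + l ≤ n ∧
          L.foldl (fun acc l =>
            let total_amount := i * 100 + j * 200 + k * 500 + l * 1000
            let total_notes := i + j + k + l
            if total_amount = amt ∧ total_notes ≤ n ∧ total_notes > acc then total_notes
            else acc) a = i + j + k + l)) ∧
      (∀ l ∈ L, ∀ v, (i * 100 + j * 200 + k * 500 + l * 1000 = amt ∧ i + j + k + l ≤ n ∧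
          v = i + j + k + l) →
        v ≤ L.foldl (fun acc l =>
          let total_amount := i * 100 + j * 200 + k * 500 + l * 1000
          let total_notes := i + j + k + l
          if total_amount = amt ∧ total_notes ≤ n ∧ total_notes > acc then total_notes
          else acc) a) := by
    intro i j k
    refine foldl_char _
      (fun l v => i * 100 + j * 200 + k * 500 + l * 1000 = amt ∧ i + j + k + l ≤ n ∧
        v = i + j + k + l) ?_ ?_ ?_
    · intro x a; dsimp only; split_ifs with h <;> omega
    · intro x a; dsimp only; split_ifs with h
      · exact Or.inr ⟨h.1, h.2.1, rfl⟩
      · exact Or.inl rfl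
    · intro x a v hq; dsimp only; split_ifs with h <;> omega
  have C3 : ∀ (i j : Int), ∀ (L : List Int) (a : Int),
      a ≤ L.foldl (fun acc k =>
          (PySem.List.pyRange 0 (tho + 1) 1).foldl (fun acc l =>
            let total_amount := i * 100 + j * 200 + k * 500 + l * 1000
            let total_notes := i + j + k + l
            if total_amount = amt ∧ total_notes ≤ n ∧ total_notes > acc then total_notes
            else acc) acc) a ∧
      (L.foldl (fun acc k =>
          (PySem.List.pyRange 0 (tho + 1) 1).foldl (fun acc l =>
            let total_amount := i * 100 + j * 200 + k * 500 + l * 1000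
            let total_notes := i + j + k + l
            if total_amount = amt ∧ total_notes ≤ n ∧ total_notes > acc then total_notes
            else acc) acc) a = a ∨
        ∃ k ∈ L, ∃ l, 0 ≤ l ∧ l < tho + 1 ∧
          (i * 100 + j * 200 + k * 500 + l * 1000 = amt ∧ i + j + k + l ≤ n ∧
            L.foldl (fun acc k =>
              (PySem.List.pyRange 0 (tho + 1) 1).foldl (fun acc l =>
                let total_amount := i * 100 + j * 200 + k * 500 + l * 1000
                let total_notes := i + j + k + l
                if total_amount = amt ∧ total_notes ≤ n ∧ total_notes > acc then total_notes
                else acc) acc) a = i + j + k + l)) ∧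
      (∀ k ∈ L, ∀ v, (∃ l, 0 ≤ l ∧ l < tho + 1 ∧
          (i * 100 + j * 200 + k * 500 + l * 1000 = amt ∧ i + j + k + l ≤ n ∧
            v = i + j + k + l)) →
        v ≤ L.foldl (fun acc k =>
          (PySem.List.pyRange 0 (tho + 1) 1).foldl (fun acc l =>
            let total_amount := i * 100 + j * 200 + k * 500 + l * 1000
            let total_notes := i + j + k + l
            if total_amount = amt ∧ total_notes ≤ n ∧ total_notes > acc then total_notes
            else acc) acc) a) := by
    intro i j
    refine foldl_char _
      (fun k v => ∃ l, 0 ≤ l ∧ l < tho + 1 ∧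
        (i * 100 + j * 200 + k * 500 + l * 1000 = amt ∧ i + j + k + l ≤ n ∧
          v = i + j + k + l)) ?_ ?_ ?_
    · intro x a; exact (C4 i j x _ a).1
    · intro x a
      rcases (C4 i j x _ a).2.1 with h | ⟨l, hl, hq⟩
      · exact Or.inl h
      · exact Or.inr ⟨l, ((PySem.List.mem_pyRange_one).mp hl).1,
          ((PySem.List.mem_pyRange_one).mp hl).2, hq⟩
    · intro x a v ⟨l, hl0, hl1, hq⟩
      exact (C4 i j x _ a).2.2 l ((PySem.List.mem_pyRange_one).mpr ⟨hl0, hl1⟩) v hq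
  have C2 : ∀ (i : Int), ∀ (L : List Int) (a : Int),
      a ≤ L.foldl (fun acc j => (PySem.List.pyRange 0 (f_hun + 1) 1).foldl (fun acc k => (PySem.List.pyRange 0 (tho + 1) 1).foldl (fun acc l =>
          let total_amount := i * 100 + j * 200 + k * 500 + l * 1000
          let total_notes := i + j + k + l
          if total_amount = amt ∧ total_notes ≤ n ∧ total_notes > acc then total_notes
          else acc) acc) acc) a ∧
      (L.foldl (fun acc j => (PySem.List.pyRange 0 (f_hun + 1) 1).foldl (fun acc k => (PySem.List.pyRange 0 (tho + 1) 1).foldl (fun acc l =>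
          let total_amount := i * 100 + j * 200 + k * 500 + l * 1000
          let total_notes := i + j + k + l
          if total_amount = amt ∧ total_notes ≤ n ∧ total_notes > acc then total_notes
          else acc) acc) acc) a = a ∨ ∃ j ∈ L, (∃ k, 0 ≤ k ∧ k < f_hun + 1 ∧ (∃ l, 0 ≤ l ∧ l < tho + 1 ∧ (i * 100 + j * 200 + k * 500 + l * 1000 = amt ∧ i + j + k + l ≤ n ∧ L.foldl (fun acc j => (PySem.List.pyRange 0 (f_hun + 1) 1).foldl (fun acc k => (PySem.List.pyRange 0 (tho + 1) 1).foldl (fun acc l =>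
          let total_amount := i * 100 + j * 200 + k * 500 + l * 1000
          let total_notes := i + j + k + l
          if total_amount = amt ∧ total_notes ≤ n ∧ total_notes > acc then total_notes
          else acc) acc) acc) a = i + j + k + l)))) ∧
      (∀ j ∈ L, ∀ v, (∃ k, 0 ≤ k ∧ k < f_hun + 1 ∧ (∃ l, 0 ≤ l ∧ l < tho + 1 ∧ (i * 100 + j * 200 + k * 500 + l * 1000 = amt ∧ i + j + k + l ≤ n ∧ v = i + j + k + l))) → v ≤ L.foldl (fun acc j => (PySem.List.pyRange 0 (f_hun + 1) 1).foldl (fun acc k => (PySem.List.pyRange 0 (tho + 1) 1).foldl (fun acc l =>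
          let total_amount := i * 100 + j * 200 + k * 500 + l * 1000
          let total_notes := i + j + k + l
          if total_amount = amt ∧ total_notes ≤ n ∧ total_notes > acc then total_notes
          else acc) acc) acc) a) := by
    intro i
    refine foldl_char _ (fun j v => (∃ k, 0 ≤ k ∧ k < f_hun + 1 ∧ (∃ l, 0 ≤ l ∧ l < tho + 1 ∧ (i * 100 + j * 200 + k * 500 + l * 1000 = amt ∧ i + j + k + l ≤ n ∧ v = i + j + k + l)))) ?_ ?_ ?_
    · intro x a; exact (C3 i x _ a).1
    · intro x a
      rcases (C3 i x _ a).2.1 with h | ⟨y, hy, hq⟩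
      · exact Or.inl h
      · exact Or.inr ⟨y, ((PySem.List.mem_pyRange_one).mp hy).1,
          ((PySem.List.mem_pyRange_one).mp hy).2, hq⟩
    · intro x a v ⟨y, hy0, hy1, hq⟩
      exact (C3 i x _ a).2.2 y ((PySem.List.mem_pyRange_one).mpr ⟨hy0, hy1⟩) v hq
  have C1 : ∀ (L : List Int) (a : Int),
      a ≤ L.foldl (fun acc i => (PySem.List.pyRange 0 (t_hun + 1) 1).foldl (fun acc j => (PySem.List.pyRange 0 (f_hun + 1) 1).foldl (fun acc k => (PySem.List.pyRange 0 (tho + 1) 1).foldl (fun acc l =>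
          let total_amount := i * 100 + j * 200 + k * 500 + l * 1000
          let total_notes := i + j + k + l
          if total_amount = amt ∧ total_notes ≤ n ∧ total_notes > acc then total_notes
          else acc) acc) acc) acc) a ∧
      (L.foldl (fun acc i => (PySem.List.pyRange 0 (t_hun + 1) 1).foldl (fun acc j => (PySem.List.pyRange 0 (f_hun + 1) 1).foldl (fun acc k => (PySem.List.pyRange 0 (tho + 1) 1).foldl (fun acc l =>
          let total_amount := i * 100 + j * 200 + k * 500 + l * 1000
          let total_notes := i + j + k + l
          if total_amount = amt ∧ total_notes ≤ n ∧ total_notes > acc then total_notes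
          else acc) acc) acc) acc) a = a ∨ ∃ i ∈ L, (∃ j, 0 ≤ j ∧ j < t_hun + 1 ∧ (∃ k, 0 ≤ k ∧ k < f_hun + 1 ∧ (∃ l, 0 ≤ l ∧ l < tho + 1 ∧ (i * 100 + j * 200 + k * 500 + l * 1000 = amt ∧ i + j + k + l ≤ n ∧ L.foldl (fun acc i => (PySem.List.pyRange 0 (t_hun + 1) 1).foldl (fun acc j => (PySem.List.pyRange 0 (f_hun + 1) 1).foldl (fun acc k => (PySem.List.pyRange 0 (tho + 1) 1).foldl (fun acc l =>
          let total_amount := i * 100 + j * 200 + k * 500 + l * 1000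
          let total_notes := i + j + k + l
          if total_amount = amt ∧ total_notes ≤ n ∧ total_notes > acc then total_notes
          else acc) acc) acc) acc) a = i + j + k + l))))) ∧
      (∀ i ∈ L, ∀ v, (∃ j, 0 ≤ j ∧ j < t_hun + 1 ∧ (∃ k, 0 ≤ k ∧ k < f_hun + 1 ∧ (∃ l, 0 ≤ l ∧ l < tho + 1 ∧ (i * 100 + j * 200 + k * 500 + l * 1000 = amt ∧ i + j + k + l ≤ n ∧ v = i + j + k + l)))) → v ≤ L.foldl (fun acc i => (PySem.List.pyRange 0 (t_hun + 1) 1).foldl (fun acc j => (PySem.List.pyRange 0 (f_hun + 1) 1).foldl (fun acc k => (PySem.List.pyRange 0 (tho + 1) 1).foldl (fun acc l =>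
          let total_amount := i * 100 + j * 200 + k * 500 + l * 1000
          let total_notes := i + j + k + l
          if total_amount = amt ∧ total_notes ≤ n ∧ total_notes > acc then total_notes
          else acc) acc) acc) acc) a) := by
    refine foldl_char _ (fun i v => (∃ j, 0 ≤ j ∧ j < t_hun + 1 ∧ (∃ k, 0 ≤ k ∧ k < f_hun + 1 ∧ (∃ l, 0 ≤ l ∧ l < tho + 1 ∧ (i * 100 + j * 200 + k * 500 + l * 1000 = amt ∧ i + j + k + l ≤ n ∧ v = i + j + k + l))))) ?_ ?_ ?_
    · intro x a; exact (C2 x _ a).1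
    · intro x a
      rcases (C2 x _ a).2.1 with h | ⟨y, hy, hq⟩
      · exact Or.inl h
      · exact Or.inr ⟨y, ((PySem.List.mem_pyRange_one).mp hy).1,
          ((PySem.List.mem_pyRange_one).mp hy).2, hq⟩
    · intro x a v ⟨y, hy0, hy1, hq⟩
      exact (C2 x _ a).2.2 y ((PySem.List.mem_pyRange_one).mpr ⟨hy0, hy1⟩) v hq
  obtain ⟨g1, g2, g3⟩ := C1 (PySem.List.pyRange 0 (hun + 1) 1) 0
  unfold ATMmachine
  refine ⟨g1, ?_, ?_⟩
  · rcases g2 with h | ⟨i, hi, j, hj0, hj1, k, hk0, hk1, l, hl0, hl1, heq, hn, hv⟩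
    · exact Or.inl h
    · have hib := (PySem.List.mem_pyRange_one).mp hi
      exact Or.inr ⟨i, j, k, l, hib.1, by omega, hj0, by omega, hk0, by omega,
        hl0, by omega, heq, hn, hv⟩
  · rintro v ⟨i, j, k, l, hi0, hi1, hj0, hj1, hk0, hk1, hl0, hl1, heq, hn, hv⟩
    exact g3 i ((PySem.List.mem_pyRange_one).mpr ⟨hi0, by omega⟩) v
      ⟨j, hj0, by omega, k, hk0, by omega, l, hl0, by omega, heq, hn, hv⟩


-- A successful closed-form candidate of B is a valid dispensation's note count.
theorem QB_to_valid (n amt hun t_hun f_hun tho k l v : Int)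
    (hneg : ¬(hun < 0 ∨ t_hun < 0 ∨ PySem.Int.mod amt 100 ≠ 0))
    (hk0 : 0 ≤ k) (hk1 : k ≤ f_hun) (hl0 : 0 ≤ l) (hl1 : l ≤ tho)
    (h : (((max (max 0 (PySem.Int.floordiv ((PySem.Int.floordiv ((amt - 500 * k) - 1000 * l) 100) - hun + 1) 2)) (k + l + (PySem.Int.floordiv ((amt - 500 * k) - 1000 * l) 100) - n)) ≤ t_hun ∧ (PySem.Int.floordiv ((amt - 500 * k) - 1000 * l) 100) - 2 * (max (max 0 (PySem.Int.floordiv ((PySem.Int.floordiv ((amt - 500 * k) - 1000 * l) 100) - hun + 1) 2)) (k + l + (PySem.Int.floordiv ((amt - 500 * k) - 1000 * l) 100) - n)) ≥ 0) ∧ v = k + l + (PySem.Int.floordiv ((amt - 500 * k) - 1000 * l) 100) - (max (max 0 (PySem.Int.floordiv ((PySem.Int.floordiv ((amt - 500 * k) - 1000 * l) 100) - hun + 1) 2)) (k + l + (PySem.Int.floordiv ((amt - 500 * k) - 1000 * l) 100) - n)))) : ValidNotes n amt hun t_hun f_hun tho v := by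
  simp only [PySem.Int.floordiv_eq_ediv_of_pos (show (0:Int) < 100 by norm_num),
      PySem.Int.mod_eq_emod_of_pos (show (0:Int) < 100 by norm_num),
      PySem.Int.floordiv_eq_ediv_of_pos (show (0:Int) < 2 by norm_num)] at h hneg
  obtain ⟨hb, hv⟩ := h
  refine ⟨((amt - 500 * k) - 1000 * l) / 100 -
    2 * max (max 0 ((((amt - 500 * k) - 1000 * l) / 100 - hun + 1) / 2))
      (k + l + ((amt - 500 * k) - 1000 * l) / 100 - n),
    max (max 0 ((((amt - 500 * k) - 1000 * l) / 100 - hun + 1) / 2))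
      (k + l + ((amt - 500 * k) - 1000 * l) / 100 - n),
    k, l, ?_, ?_, ?_, ?_, ?_, ?_, ?_, ?_, ?_, ?_, ?_⟩ <;> omega

-- Every valid dispensation with k 500s and l 1000s lies inside B's scan and is
-- dominated by B's closed-form candidate for that (k,l).
theorem valid_to_QB (n amt hun t_hun f_hun tho v : Int)
    (hv : ValidNotes n amt hun t_hun f_hun tho v) :
    ∃ k l : Int, 0 ≤ k ∧ k ≤ min (min f_hun (PySem.Int.floordiv amt 500)) n ∧
      0 ≤ l ∧ l ≤ min (min tho (PySem.Int.floordiv (amt - 500 * k) 1000)) (n - k) ∧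
      (((max (max 0 (PySem.Int.floordiv ((PySem.Int.floordiv ((amt - 500 * k) - 1000 * l) 100) - hun + 1) 2)) (k + l + (PySem.Int.floordiv ((amt - 500 * k) - 1000 * l) 100) - n)) ≤ t_hun ∧ (PySem.Int.floordiv ((amt - 500 * k) - 1000 * l) 100) - 2 * (max (max 0 (PySem.Int.floordiv ((PySem.Int.floordiv ((amt - 500 * k) - 1000 * l) 100) - hun + 1) 2)) (k + l + (PySem.Int.floordiv ((amt - 500 * k) - 1000 * l) 100) - n)) ≥ 0) ∧ (k + l + (PySem.Int.floordiv ((amt - 500 * k) - 1000 * l) 100) - (max (max 0 (PySem.Int.floordiv ((PySem.Int.floordiv ((amt - 500 * k) - 1000 * l) 100) - hun + 1) 2)) (k + l + (PySem.Int.floordiv ((amt - 500 * k) - 1000 * l) 100) - n))) = k + l + (PySem.Int.floordiv ((amt - 500 * k) - 1000 * l) 100) - (max (max 0 (PySem.Int.floordiv ((PySem.Int.floordiv ((amt - 500 * k) - 1000 * l) 100) - hun + 1) 2)) (k + l + (PySem.Int.floordiv ((amt - 500 * k) - 1000 * l) 100) - n))) ∧ v ≤ k + l + (PySem.Int.floordiv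 ((amt - 500 * k) - 1000 * l) 100) - (max (max 0 (PySem.Int.floordiv ((PySem.Int.floordiv ((amt - 500 * k) - 1000 * l) 100) - hun + 1) 2)) (k + l + (PySem.Int.floordiv ((amt - 500 * k) - 1000 * l) 100) - n)) := by
  obtain ⟨i, j, k, l, hi0, hi1, hj0, hj1, hk0, hk1, hl0, hl1, heq, hn, hveq⟩ := hv
  refine ⟨k, l, hk0, ?_, hl0, ?_, ⟨⟨?_, ?_⟩, rfl⟩, ?_⟩ <;>
    simp only [PySem.Int.floordiv_eq_ediv_of_pos (show (0:Int) < 100 by norm_num),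
      PySem.Int.floordiv_eq_ediv_of_pos (show (0:Int) < 2 by norm_num),
      PySem.Int.floordiv_eq_ediv_of_pos (show (0:Int) < 500 by norm_num),
      PySem.Int.floordiv_eq_ediv_of_pos (show (0:Int) < 1000 by norm_num)] <;> omega

theorem charB (n amt hun t_hun f_hun tho : Int) :
    0 ≤ ATMmachine_alt n amt hun t_hun f_hun tho ∧
    (ATMmachine_alt n amt hun t_hun f_hun tho = 0 ∨
      ValidNotes n amt hun t_hun f_hun tho (ATMmachine_alt n amt hun t_hun f_hun tho)) ∧
    (∀ v, ValidNotes n amt hun t_hun f_hun tho v → v ≤ ATMmachine_alt n amt hun t_hun f_hun tho) := by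
  have CB2 : ∀ (k : Int), ∀ (L : List Int) (a : Int),
      let rem := amt - 500 * k
      a ≤ L.foldl (fun best l =>
        let m := PySem.Int.floordiv (rem - 1000 * l) 100
        let j := max (max 0 (PySem.Int.floordiv (m - hun + 1) 2)) (k + l + m - n)
        if j ≤ t_hun ∧ m - 2 * j ≥ 0 then max best (k + l + m - j)
        else best) a ∧
      (L.foldl (fun best l =>
        let m := PySem.Int.floordiv (rem - 1000 * l) 100
        let j := max (max 0 (PySem.Int.floordiv (m - hun + 1) 2)) (k + l + m - n)
        if j ≤ t_hun ∧ m - 2 * j ≥ 0 then max best (k + l + m - j)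
        else best) a = a ∨ ∃ l ∈ L, (((max (max 0 (PySem.Int.floordiv ((PySem.Int.floordiv ((amt - 500 * k) - 1000 * l) 100) - hun + 1) 2)) (k + l + (PySem.Int.floordiv ((amt - 500 * k) - 1000 * l) 100) - n)) ≤ t_hun ∧ (PySem.Int.floordiv ((amt - 500 * k) - 1000 * l) 100) - 2 * (max (max 0 (PySem.Int.floordiv ((PySem.Int.floordiv ((amt - 500 * k) - 1000 * l) 100) - hun + 1) 2)) (k + l + (PySem.Int.floordiv ((amt - 500 * k) - 1000 * l) 100) - n)) ≥ 0) ∧ L.foldl (fun best l =>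
        let m := PySem.Int.floordiv (rem - 1000 * l) 100
        let j := max (max 0 (PySem.Int.floordiv (m - hun + 1) 2)) (k + l + m - n)
        if j ≤ t_hun ∧ m - 2 * j ≥ 0 then max best (k + l + m - j)
        else best) a = k + l + (PySem.Int.floordiv ((amt - 500 * k) - 1000 * l) 100) - (max (max 0 (PySem.Int.floordiv ((PySem.Int.floordiv ((amt - 500 * k) - 1000 * l) 100) - hun + 1) 2)) (k + l + (PySem.Int.floordiv ((amt - 500 * k) - 1000 * l) 100) - n)))) ∧
      (∀ l ∈ L, ∀ v, (((max (max 0 (PySem.Int.floordiv ((PySem.Int.floordiv ((amt - 500 * k) - 1000 * l) 100) - hun + 1) 2)) (k + l + (PySem.Int.floordiv ((amt - 500 * k) - 1000 * l) 100) - n)) ≤ t_hun ∧ (PySem.Int.floordiv ((amt - 500 * k) - 1000 * l) 100) - 2 * (max (max 0 (PySem.Int.floordiv ((PySem.Int.floordiv ((amt - 500 * k) - 1000 * l) 100) - hun + 1) 2)) (k + l + (PySem.Int.floordiv ((amt - 500 * k) - 1000 * l) 100) - n)) ≥ 0) ∧ v = k + l + (PySem.Int.floordiv ((amt - 500 * k)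 - 1000 * l) 100) - (max (max 0 (PySem.Int.floordiv ((PySem.Int.floordiv ((amt - 500 * k) - 1000 * l) 100) - hun + 1) 2)) (k + l + (PySem.Int.floordiv ((amt - 500 * k) - 1000 * l) 100) - n))) → v ≤ L.foldl (fun best l =>
        let m := PySem.Int.floordiv (rem - 1000 * l) 100
        let j := max (max 0 (PySem.Int.floordiv (m - hun + 1) 2)) (k + l + m - n)
        if j ≤ t_hun ∧ m - 2 * j ≥ 0 then max best (k + l + m - j)
        else best) a) := by
    intro k
    refine foldl_char _ (fun l v => (((max (max 0 (PySem.Int.floordiv ((PySem.Int.floordiv ((amt - 500 * k) - 1000 * l) 100) - hun + 1) 2)) (k + l + (PySem.Int.floordiv ((amt - 500 * k) - 1000 * l) 100) - n)) ≤ t_hun ∧ (PySem.Int.floordiv ((amt - 500 * k) - 1000 * l) 100) - 2 * (max (max 0 (PySem.Int.floordiv ((PySem.Int.floordiv ((amt - 500 * k) - 1000 * l) 100) - hun + 1) 2)) (k + l + (PySem.Int.floordiv ((amt - 500 * k) - 1000 * l) 100) - n)) ≥ 0) ∧ v = k + l + (PySem.Int.floordiv ((amt - 500 * k) - 1000 *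 l) 100) - (max (max 0 (PySem.Int.floordiv ((PySem.Int.floordiv ((amt - 500 * k) - 1000 * l) 100) - hun + 1) 2)) (k + l + (PySem.Int.floordiv ((amt - 500 * k) - 1000 * l) 100) - n)))) ?_ ?_ ?_
    · intro x a; dsimp only; split_ifs <;> simp
    · intro x a; dsimp only; split_ifs with hb
      · rcases max_choice a (k + x + PySem.Int.floordiv ((amt - 500 * k) - 1000 * x) 100 -
          max (max 0 (PySem.Int.floordiv (PySem.Int.floordiv ((amt - 500 * k) - 1000 * x) 100 - hun + 1) 2))
            (k + x + PySem.Int.floordiv ((amt - 500 * k) - 1000 * x) 100 - n)) with h | h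
        · exact Or.inl h
        · exact Or.inr ⟨hb, h⟩
      · exact Or.inl rfl
    · intro x a v hq
      obtain ⟨hb, hv⟩ := hq
      dsimp only; split_ifs
      exact hv ▸ le_max_right a _
  have CB1 : ∀ (L : List Int) (a : Int),
      a ≤ L.foldl (fun best k =>
      let rem := amt - 500 * k
      (PySem.List.pyRange 0 (min (min tho (PySem.Int.floordiv rem 1000)) (n - k) + 1) 1).foldl (fun best l =>
        let m := PySem.Int.floordiv (rem - 1000 * l) 100
        let j := max (max 0 (PySem.Int.floordiv (m - hun + 1) 2)) (k + l + m - n)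
        if j ≤ t_hun ∧ m - 2 * j ≥ 0 then max best (k + l + m - j)
        else best) best) a ∧
      (L.foldl (fun best k =>
      let rem := amt - 500 * k
      (PySem.List.pyRange 0 (min (min tho (PySem.Int.floordiv rem 1000)) (n - k) + 1) 1).foldl (fun best l =>
        let m := PySem.Int.floordiv (rem - 1000 * l) 100
        let j := max (max 0 (PySem.Int.floordiv (m - hun + 1) 2)) (k + l + m - n)
        if j ≤ t_hun ∧ m - 2 * j ≥ 0 then max best (k + l + m - j)
        else best) best) a = a ∨ ∃ k ∈ L, (∃ l, 0 ≤ l ∧ l < min (min tho (PySem.Int.floordiv (amt - 500 * k) 1000)) (n - k) + 1 ∧ (((max (max 0 (PySem.Int.floordiv ((PySem.Int.floordiv ((amt - 500 * k) - 1000 * l) 100) - hun + 1) 2)) (k + l + (PySem.Int.floordiv ((amt - 500 * k) - 1000 * l) 100) - n)) ≤ t_hun ∧ (PySem.Int.floordiv ((amt - 500 * k) - 1000 * l) 100) - 2 * (max (max 0 (PySem.Int.floordiv ((PySem.Int.floordiv ((amt - 500 * k) - 1000 * l) 100) - hun + 1) 2)) (k + l + (PySem.Int.floordiv ((amt - 500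 * k) - 1000 * l) 100) - n)) ≥ 0) ∧ L.foldl (fun best k =>
      let rem := amt - 500 * k
      (PySem.List.pyRange 0 (min (min tho (PySem.Int.floordiv rem 1000)) (n - k) + 1) 1).foldl (fun best l =>
        let m := PySem.Int.floordiv (rem - 1000 * l) 100
        let j := max (max 0 (PySem.Int.floordiv (m - hun + 1) 2)) (k + l + m - n)
        if j ≤ t_hun ∧ m - 2 * j ≥ 0 then max best (k + l + m - j)
        else best) best) a = k + l + (PySem.Int.floordiv ((amt - 500 * k) - 1000 * l) 100) - (max (max 0 (PySem.Int.floordiv ((PySem.Int.floordiv ((amt - 500 * k) - 1000 * l) 100) - hun + 1) 2)) (k + l + (PySem.Int.floordiv ((amt - 500 * k) - 1000 * l) 100) - n))))) ∧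
      (∀ k ∈ L, ∀ v, (∃ l, 0 ≤ l ∧ l < min (min tho (PySem.Int.floordiv (amt - 500 * k) 1000)) (n - k) + 1 ∧ (((max (max 0 (PySem.Int.floordiv ((PySem.Int.floordiv ((amt - 500 * k) - 1000 * l) 100) - hun + 1) 2)) (k + l + (PySem.Int.floordiv ((amt - 500 * k) - 1000 * l) 100) - n)) ≤ t_hun ∧ (PySem.Int.floordiv ((amt - 500 * k) - 1000 * l) 100) - 2 * (max (max 0 (PySem.Int.floordiv ((PySem.Int.floordiv ((amt - 500 * k) - 1000 * l) 100) - hun + 1) 2)) (k + l + (PySem.Int.floordiv ((amt - 500 * k) - 1000 * l) 100) - n)) ≥ 0) ∧ v = k + l + (PySem.Int.floordiv ((amt - 500 * k) - 1000 * l) 100) - (max (max 0 (PySem.Int.floordiv ((PySem.Int.floordiv ((amt - 500 * k) - 1000 * l) 100) - hun + 1) 2)) (k + l + (PySem.Int.floordiv ((amt - 500 * k) - 1000 * l) 100) - n)))) → v ≤ L.foldl (fun best k =>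
      let rem := amt - 500 * k
      (PySem.List.pyRange 0 (min (min tho (PySem.Int.floordiv rem 1000)) (n - k) + 1) 1).foldl (fun best l =>
        let m := PySem.Int.floordiv (rem - 1000 * l) 100
        let j := max (max 0 (PySem.Int.floordiv (m - hun + 1) 2)) (k + l + m - n)
        if j ≤ t_hun ∧ m - 2 * j ≥ 0 then max best (k + l + m - j)
        else best) best) a) := by
    refine foldl_char _ (fun k v => (∃ l, 0 ≤ l ∧ l < min (min tho (PySem.Int.floordiv (amt - 500 * k) 1000)) (n - k) + 1 ∧ (((max (max 0 (PySem.Int.floordiv ((PySem.Int.floordiv ((amt - 500 * k) - 1000 * l) 100) - hun + 1) 2)) (k + l + (PySem.Int.floordiv ((amt - 500 * k) - 1000 * l) 100) - n)) ≤ t_hun ∧ (PySem.Int.floordiv ((amt - 500 * k) - 1000 * l) 100) - 2 * (max (max 0 (PySem.Int.floordiv ((PySem.Int.floordiv ((amt - 500 * k) - 1000 * l) 100) - hun + 1) 2)) (k + l + (PySem.Int.floordiv ((amt - 500 * k) - 1000 * l) 100) - n)) ≥ 0) ∧ v = k + l + (PySem.Int.floordiv ((amt - 500 * k) - 1000 *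 l) 100) - (max (max 0 (PySem.Int.floordiv ((PySem.Int.floordiv ((amt - 500 * k) - 1000 * l) 100) - hun + 1) 2)) (k + l + (PySem.Int.floordiv ((amt - 500 * k) - 1000 * l) 100) - n))))) ?_ ?_ ?_
    · intro x a; exact (CB2 x _ a).1
    · intro x a
      rcases (CB2 x _ a).2.1 with h | ⟨y, hy, hq⟩
      · exact Or.inl h
      · exact Or.inr ⟨y, ((PySem.List.mem_pyRange_one).mp hy).1,
          ((PySem.List.mem_pyRange_one).mp hy).2, hq⟩
    · intro x a v ⟨y, hy0, hy1, hq⟩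
      exact (CB2 x _ a).2.2 y ((PySem.List.mem_pyRange_one).mpr ⟨hy0, hy1⟩) v hq
  unfold ATMmachine_alt
  split_ifs with hneg
  · refine ⟨le_refl 0, Or.inl rfl, ?_⟩
    rintro v ⟨i, j, k, l, hi0, hi1, hj0, hj1, hk0, hk1, hl0, hl1, heq, hn, hveq⟩
    have h100 : PySem.Int.mod amt 100 = 0 := by
      rw [PySem.Int.mod_eq_emod_of_pos (show (0:Int) < 100 by norm_num)]; omega
    rcases hneg with h | h | h <;> omega
  · obtain ⟨g1, g2, g3⟩ :=
      CB1 (PySem.List.pyRange 0 (min (min f_hun (PySem.Int.floordiv amt 500)) n + 1) 1) 0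
    refine ⟨g1, ?_, ?_⟩
    · rcases g2 with h | ⟨k, hk, l, hl0, hl1, hq⟩
      · exact Or.inl h
      · have hkb := (PySem.List.mem_pyRange_one).mp hk
        exact Or.inr (QB_to_valid n amt hun t_hun f_hun tho k l _ hneg hkb.1 (by omega)
          hl0 (by omega) hq)
    · rintro v hv
      obtain ⟨k, l, hk0, hk1, hl0, hl1, hcand, hle⟩ := valid_to_QB n amt hun t_hun f_hun tho v hv
      exact le_trans hle (g3 k ((PySem.List.mem_pyRange_one).mpr ⟨hk0, by omega⟩) _
        ⟨l, hl0, by omega, hcand⟩)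

-- ===== VERDICT (by name: the statement is the Claim_ definition above) =====
theorem ATMmachine_spec : Claim_equal_ATMmachine := by
  intro n amt hun t_hun f_hun tho _
  unfold Spec_ATMmachine
  obtain ⟨ha0, hamem, haub⟩ := charA n amt hun t_hun f_hun tho
  obtain ⟨hb0, hbmem, hbub⟩ := charB n amt hun t_hun f_hun tho
  rcases hamem with h | h
  · rcases hbmem with h' | h'
    · rw [h, h']
    · have := haub _ h'
      omega
  · have h1 := hbub _ h
    rcases hbmem with h' | h'
    · omega
    · have := haub _ h'
      omega
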